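-- pv_equiv track=rewrite | github.com/shutterfreak/topmark | src/topmark/presentation/markdown/utils.py | markdown_code_span
-- ===== SOURCE A (Python) =====
-- def markdown_code_span(text: str) -> str:
--     """Render `text` as a Markdown inline code span.
--
--     This chooses a backtick fence that is one longer than the longest run of
--     backticks in `text`, which safely supports filenames that contain backticks.
--
--     Args:
--         text: Raw text to wrap.
--
--     Returns:
--         Markdown inline code span.
--     """
--     max_run: int = 0
--     run: int = 0
--     for ch in text:
--         if ch == "`":
--             run += 1
--             if run > max_run:
--                 max_run = run
--         else:
--             run = 0
--
--     fence: str = "`" * (max_run + 1)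
--     return f"{fence}{text}{fence}"
-- ===== SOURCE B (Python) =====
-- def markdown_code_span(text: str) -> str:
--     # Grow the fence until it is not a substring of `text`: no backtick-run
--     # bookkeeping at all; the shortest fence absent from the text is safe.
--     fence = "`"
--     while fence in text:
--         fence += "`"
--     return f"{fence}{text}{fence}"
-- ===== Notes on version B (the rewrite author's own statement) =====
-- stated objective: simpler
-- what changed: Instead of scanning characters to compute the longest backtick run, B never counts runs: it grows a candidate fence one backtick at a time until the fence string is no longer a substring of the text, which is exactly the shortest safe fence.
import Mathlib
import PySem

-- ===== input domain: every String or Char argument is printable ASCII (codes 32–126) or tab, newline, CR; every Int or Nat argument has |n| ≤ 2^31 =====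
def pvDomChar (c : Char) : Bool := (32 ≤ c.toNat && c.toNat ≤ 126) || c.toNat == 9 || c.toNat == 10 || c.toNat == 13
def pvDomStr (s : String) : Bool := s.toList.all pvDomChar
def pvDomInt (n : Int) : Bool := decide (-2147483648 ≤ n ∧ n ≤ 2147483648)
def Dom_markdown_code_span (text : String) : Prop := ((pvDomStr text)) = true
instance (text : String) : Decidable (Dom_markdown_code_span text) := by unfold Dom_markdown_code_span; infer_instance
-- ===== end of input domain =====

-- B never counts backtick runs: it grows a candidate fence one backtick at a time until the
-- fence is not a substring of the text (objective: simpler; same return value).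

-- ===== PORT A =====
-- the for-loop of A: state (max_run, run), returning max_run at the end
def mcsLoop : List Char → Nat → Nat → Nat
  | [], max_run, _ => max_run
  | c :: cs, max_run, run =>
      if c = '`' then
        let run' := run + 1
        mcsLoop cs (if run' > max_run then run' else max_run) run'
      else
        mcsLoop cs max_run 0

def markdown_code_span (text : String) : String :=
  let max_run := mcsLoop text.toList 0 0
  let fence := String.ofList (List.replicate (max_run + 1) '`')
  fence ++ text ++ fence

-- ===== PORT B =====
-- the while-loop of B: 'while fence in text: fence += "`"' ('in' = PySem.Chars.isIn)
def mcsGrow (text : List Char) (fence : List Char) : List Char :=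
  if h : PySem.Chars.isIn fence text = true then
    mcsGrow text (fence ++ ['`'])
  else
    fence
  termination_by text.length + 1 - fence.length
  decreasing_by
    have := List.IsInfix.length_le ((PySem.Chars.isIn_iff_infix _ _).mp h)
    simp only [List.length_append, List.length_cons, List.length_nil]
    omega

def markdown_code_span_alt (text : String) : String :=
  let fence := String.ofList (mcsGrow text.toList ['`'])
  fence ++ text ++ fence

-- ===== PRECONDITION & SPEC =====
def Spec_markdown_code_span (text : String) (out : String) : Prop := out = markdown_code_span_alt text
instance (text : String) (out : String) : Decidable (Spec_markdown_code_span text out) := by unfold Spec_markdown_code_span; infer_instance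

-- ===== CLAIM (what is proved, stated in full; the proofs are below) =====
def Claim_equal_markdown_code_span : Prop := ∀ (text : String), Dom_markdown_code_span text → Spec_markdown_code_span text (markdown_code_span text)

-- ===== LEMMAS AND PROOFS =====

-- reference recursion: the maximal run length reachable, starting with a current run of r
def mcsMr : List Char → Nat → Nat
  | [], r => r
  | c :: cs, r => if c = '`' then mcsMr cs (r + 1) else Nat.max r (mcsMr cs 0)

theorem mcsMr_ge (l : List Char) (r : Nat) : r ≤ mcsMr l r := by
  induction l generalizing r with
  | nil => simp [mcsMr]
  | cons c cs ih =>
      simp only [mcsMr]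
      split
      · exact le_trans (Nat.le_succ r) (ih (r + 1))
      · exact Nat.le_max_left _ _

theorem mcsLoop_eq (l : List Char) (m r : Nat) (h : r ≤ m) :
    mcsLoop l m r = Nat.max m (mcsMr l r) := by
  induction l generalizing m r with
  | nil => simp [mcsLoop, mcsMr, Nat.max_eq_left h]
  | cons c cs ih =>
      simp only [mcsLoop, mcsMr]
      split
      · rw [ih _ _ (by split_ifs <;> omega : r + 1 ≤ if r + 1 > m then r + 1 else m)]
        have h1 := mcsMr_ge cs (r + 1)
        simp only [Nat.max_def]
        split_ifs <;> omega
      · rw [ih _ _ (Nat.zero_le m)]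
        have := mcsMr_ge cs 0
        simp only [Nat.max_def]
        split_ifs <;> omega

-- the head run of the list, as takeWhile
theorem replicate_prefix_iff (l : List Char) (k : Nat) :
    (List.replicate k '`' <+: l) ↔ k ≤ (l.takeWhile (· = '`')).length := by
  induction l generalizing k with
  | nil =>
      cases k with
      | zero => simp
      | succ k => simp [List.replicate]
  | cons c cs ih =>
      cases k with
      | zero => simp
      | succ k =>
          by_cases hc : c = '`'
          · subst hc
            simp only [List.replicate, List.cons_prefix_cons, List.takeWhile,
              decide_true, List.length_cons]
            constructor
            · rintro ⟨-, h⟩; exact Nat.succ_le_succ ((ih k).mp h)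
            · intro h; exact ⟨trivial, (ih k).mpr (Nat.le_of_succ_le_succ h)⟩
          · have hc' : (decide (c = '`')) = false := by simp [hc]
            simp only [List.replicate, List.cons_prefix_cons, List.takeWhile, hc']
            constructor
            · rintro ⟨h, -⟩; exact absurd h.symm hc
            · intro h; simp at h
  
theorem mcsMr_chunk (cs : List Char) (r : Nat) :
    mcsMr cs r = Nat.max (r + (cs.takeWhile (· = '`')).length)
                         (mcsMr (cs.dropWhile (· = '`')) 0) := by
  induction cs generalizing r with
  | nil => simp [mcsMr]
  | cons d ds ih =>
      by_cases hd : d = '`'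
      · simp only [mcsMr, List.takeWhile, List.dropWhile, hd, decide_true,
          List.length_cons]
        rw [ih (r + 1)]
        simp only [Nat.max_def]
        split_ifs <;> omega
      · have hd' : (decide (d = '`')) = false := by simp [hd]
        simp only [mcsMr, List.takeWhile, List.dropWhile, hd', if_neg hd]
        simp only [List.length_nil, Nat.add_zero, Nat.zero_max]

theorem mcsMr_cons (c : Char) (cs : List Char) :
    mcsMr (c :: cs) 0 = Nat.max ((c :: cs).takeWhile (· = '`')).length (mcsMr cs 0) := by
  by_cases hc : c = '`'
  · simp only [mcsMr, List.takeWhile, hc, decide_true, List.length_cons]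
    rw [mcsMr_chunk cs 1, mcsMr_chunk cs 0]
    simp only [Nat.max_def]
    split_ifs <;> omega
  · have hc' : (decide (c = '`')) = false := by simp [hc]
    simp [mcsMr, hc, List.takeWhile]

theorem replicate_infix_iff (l : List Char) (k : Nat) :
    (List.replicate k '`' <:+: l) ↔ k ≤ mcsMr l 0 := by
  induction l with
  | nil =>
      cases k with
      | zero => simp [mcsMr]
      | succ k => simp [mcsMr, List.replicate]
  | cons c cs ih =>
      rw [List.infix_cons_iff, replicate_prefix_iff, ih, mcsMr_cons]
      exact (le_max_iff).symm

theorem mcsGrow_eq (l : List Char) (k : Nat) (h1 : 1 ≤ k) (h2 : k ≤ mcsMr l 0 + 1) :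
    mcsGrow l (List.replicate k '`') = List.replicate (mcsMr l 0 + 1) '`' := by
  have hd : ∀ d k, 1 ≤ k → k ≤ mcsMr l 0 + 1 → mcsMr l 0 + 1 - k = d →
      mcsGrow l (List.replicate k '`') = List.replicate (mcsMr l 0 + 1) '`' := by
    intro d
    induction d with
    | zero =>
        intro k h1 h2 hd
        have hk : k = mcsMr l 0 + 1 := by omega
        subst hk
        rw [mcsGrow]
        have : ¬ (PySem.Chars.isIn (List.replicate (mcsMr l 0 + 1) '`') l = true) := by
          rw [PySem.Chars.isIn_iff_infix, replicate_infix_iff]; omega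
        simp [this]
    | succ d ih =>
        intro k h1 h2 hd
        have hlt : k ≤ mcsMr l 0 := by omega
        rw [mcsGrow]
        have hin : PySem.Chars.isIn (List.replicate k '`') l = true := by
          rw [PySem.Chars.isIn_iff_infix, replicate_infix_iff]; omega
        rw [dif_pos hin, show List.replicate k '`' ++ ['`'] = List.replicate (k + 1) '`' by
          simp [List.replicate_succ']]
        exact ih (k + 1) (by omega) (by omega) (by omega)
  exact hd _ k h1 h2 rfl

-- ===== VERDICT (by name: the statement is the Claim_ definition above) =====
theorem mcsGrow_one (l : List Char) :
    mcsGrow l ['`'] = List.replicate (mcsMr l 0 + 1) '`' := by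
  rw [show ['`'] = List.replicate 1 '`' from rfl]
  exact mcsGrow_eq l 1 (Nat.le_refl 1) (by omega)

theorem markdown_code_span_spec : Claim_equal_markdown_code_span := by
  intro text _
  unfold Spec_markdown_code_span markdown_code_span markdown_code_span_alt
  simp only [mcsLoop_eq _ _ _ (Nat.le_refl 0), Nat.zero_max, mcsGrow_one]
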